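-- pv_equiv track=rewrite | github.com/Eric-Hanzel/Python_Projects | Figures_of_reorganization/22372129_Eric_SecondAssignment.py | find_digit_nl1
-- ===== SOURCE A (Python) =====
-- def find_digit_nl1(l):
--     i = len(l)-2
--     while i != -1:
--         if l[i] > l[i+1]:
--             return i
--         else:
--             i = i - 1
--     return -1
-- ===== SOURCE B (Python) =====
-- def find_digit_nl1(l):
--     result = -1
--     for i in range(len(l) - 1):
--         if l[i] > l[i + 1]:
--             result = i
--     return result
-- ===== Notes on version B (the rewrite author's own statement) =====
-- stated objective: alternative
-- what changed: replaces A's right-to-left while loop with early return by a single left-to-right for-pass over range(len(l)-1) that accumulates the last descent index (default -1)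
import Mathlib
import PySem

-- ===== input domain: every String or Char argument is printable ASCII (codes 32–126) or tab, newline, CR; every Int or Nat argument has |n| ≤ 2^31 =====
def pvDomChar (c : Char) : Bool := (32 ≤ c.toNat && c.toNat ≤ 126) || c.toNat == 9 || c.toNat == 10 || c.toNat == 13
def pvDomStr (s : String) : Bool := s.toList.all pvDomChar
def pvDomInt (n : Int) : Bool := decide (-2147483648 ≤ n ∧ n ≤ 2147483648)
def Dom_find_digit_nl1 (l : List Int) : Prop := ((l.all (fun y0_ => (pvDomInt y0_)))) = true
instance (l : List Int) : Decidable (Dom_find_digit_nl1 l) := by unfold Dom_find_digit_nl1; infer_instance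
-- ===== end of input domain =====

-- B replaces A's right-to-left early-return scan by a left-to-right accumulating pass (objective: alternative).

-- ===== PORT A =====
-- A's while loop counts i down from len(l)-2 to -1; ported as recursion on the
-- counter k = i+1 (k = 0 is the 'i = -1' exit). Indexing l[i], l[i+1] is always
-- in range when 0 ≤ i ≤ len-2, so pyGetD is exact there.
def find_digit_nl1_auxA (l : List Int) : Nat → Int
  | 0 => -1
  | (k+1) =>
      if PySem.List.pyGetD l (k : Int) 0 > PySem.List.pyGetD l ((k : Int) + 1) 0 then (k : Int)
      else find_digit_nl1_auxA l k

def find_digit_nl1 (l : List Int) : Int := find_digit_nl1_auxA l (l.length - 1)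

-- ===== PORT B =====
def find_digit_nl1_alt (l : List Int) : Int :=
  (PySem.List.pyRange 0 ((l.length : Int) - 1) 1).foldl
    (fun acc i => if PySem.List.pyGetD l i 0 > PySem.List.pyGetD l (i + 1) 0 then i else acc) (-1)

-- ===== PRECONDITION & SPEC =====
-- A raises IndexError on the empty list (i starts at -2 and l[-2] is evaluated); Pre_ excludes exactly that input.
def Pre_find_digit_nl1 (l : List Int) : Prop := l ≠ []
instance (l : List Int) : Decidable (Pre_find_digit_nl1 l) := by unfold Pre_find_digit_nl1; infer_instance
def pvWitness_find_digit_nl1 : List Int := [3, 1, 2]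

def Spec_find_digit_nl1 (l : List Int) (out : Int) : Prop := out = find_digit_nl1_alt l
instance (l : List Int) (out : Int) : Decidable (Spec_find_digit_nl1 l out) := by unfold Spec_find_digit_nl1; infer_instance

-- ===== CLAIM (what is proved, stated in full; the proofs are below) =====
def Claim_equal_find_digit_nl1 : Prop := ∀ (l : List Int), Dom_find_digit_nl1 l → Pre_find_digit_nl1 l → Spec_find_digit_nl1 l (find_digit_nl1 l)

-- ===== LEMMAS AND PROOFS =====
-- A's countdown from k equals B's fold over range(0, k): by induction, peeling
-- the last range element with pyRange_one_succ_right.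
theorem find_digit_nl1_aux_eq (l : List Int) (k : Nat) :
    find_digit_nl1_auxA l k =
      (PySem.List.pyRange 0 (k : Int) 1).foldl
        (fun acc i => if PySem.List.pyGetD l i 0 > PySem.List.pyGetD l (i + 1) 0 then i else acc) (-1) := by
  induction k with
  | zero => simp [find_digit_nl1_auxA, PySem.List.pyRange_one_eq_nil]
  | succ k ih =>
      have h : PySem.List.pyRange 0 ((k : Int) + 1) 1
          = PySem.List.pyRange 0 (k : Int) 1 ++ [(k : Int)] :=
        PySem.List.pyRange_one_succ_right (by exact_mod_cast Nat.zero_le k)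
      simp only [find_digit_nl1_auxA, Nat.cast_succ, h, List.foldl_append, List.foldl_cons,
        List.foldl_nil, ih]

-- ===== VERDICT (by name: the statement is the Claim_ definition above) =====
theorem find_digit_nl1_spec : Claim_equal_find_digit_nl1 := by
  intro l _ hpre
  unfold Spec_find_digit_nl1 find_digit_nl1 find_digit_nl1_alt
  rw [find_digit_nl1_aux_eq]
  have hlen : 1 ≤ l.length := List.length_pos_iff.mpr hpre
  have h1 : ((l.length - 1 : Nat) : Int) = (l.length : Int) - 1 := by omega
  rw [h1]
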